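-- pv_equiv track=rewrite | github.com/maria-pugacheva/LeetCode | src/python/_01_easy/_1716_calculate-money-in-leetcode-bank.py | solution
-- ===== SOURCE A (Python) =====
-- def solution(n: int) -> int:
--     """Hercy is saving money for his first car by depositing funds into
--     the Leetcode bank daily. He begins with $1 on Monday, the first day,
--     and each subsequent day up to Sunday sees an increase of $1 compared
--     to the previous day. Each following Monday, his deposit increases by
--     an additional $1 compared to the previous Monday. Given n, return
--     the total amount of money he will have in the Leetcode bank at the
--     end of the n-th day.
--
--     Preconditions:
--         1 <= n <= 1000
--
--     Examples:
--         >>> solution(4)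
--         10
--         >>> solution(10)
--         37
--         >>> solution(20)
--         96
--     """
--     weeks = n // 7
--     first_week = 28
--     last_week = first_week + (weeks - 1) * 7
--     total = (first_week + last_week) * weeks / 2
--     k = weeks + 1
--     for day in range(n % 7):
--         total += k
--         k += 1
--     return int(total)
-- ===== SOURCE B (Python) =====
-- def solution(n: int) -> int:
--     weeks, rest = divmod(n, 7)
--     # 28 dollars per full week plus an extra 7 for every later week,
--     # then the partial week: rest days starting at weeks+1 dollars.
--     return (28 * weeks + 7 * weeks * (weeks - 1) // 2
--             + rest * (weeks + 1) + rest * (rest - 1) // 2)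
-- ===== Notes on version B (the rewrite author's own statement) =====
-- stated objective: simpler
-- what changed: Replaced A's float-valued arithmetic-series formula plus a remainder for-loop by a single all-integer closed form (triangular numbers for the full weeks and for the partial week), with no loop and no float.
-- intended difference: For inputs of absolute value above three hundred fifty million the bank total exceeds double precision, so A's float true division returns a rounded total (A gives 9257144117142850 at the witness) while B returns the exact integer total (9257144117142852), which is the intended value. — e.g. on solution(360000000): A returns 9257144117142850, B returns 9257144117142852
import Mathlib
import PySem

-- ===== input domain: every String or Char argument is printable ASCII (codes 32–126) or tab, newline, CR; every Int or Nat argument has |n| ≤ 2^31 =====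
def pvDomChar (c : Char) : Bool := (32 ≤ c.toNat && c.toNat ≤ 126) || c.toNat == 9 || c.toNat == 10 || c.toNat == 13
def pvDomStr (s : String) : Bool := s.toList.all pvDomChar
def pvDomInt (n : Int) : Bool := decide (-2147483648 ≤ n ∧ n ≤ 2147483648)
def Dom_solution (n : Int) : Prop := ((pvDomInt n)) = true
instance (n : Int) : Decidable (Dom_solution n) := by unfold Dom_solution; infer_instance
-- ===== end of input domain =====

-- B replaces A's float arithmetic-series formula plus remainder loop by one all-integer
-- closed form (triangular numbers), no loop and no float (objective: simpler); on inputs of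
-- absolute value above three hundred fifty million A's float rounds the total while B returns
-- the exact sum (see D_solution).


-- ===== PORT A =====
-- Model of CPython's float values in A: every float A holds is integer-valued, and every
-- float operation in A (int/int true division with an even, hence integer, exact quotient;
-- float + int) is correctly rounded, i.e. produces the IEEE-754 double nearest the exact
-- integer result: round the magnitude to 53 significant bits, ties to even (exact below 2^53).
def pvRound53Nat (m : Nat) : Int :=
  if m ≤ 2 ^ 53 then (m : Int)
  else
    let e := Nat.log2 m
    let ulp := 2 ^ (e - 52)
    let q := m / ulp
    let r := m % ulp
    if r < ulp / 2 then ((q * ulp : Nat) : Int)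
    else if ulp / 2 < r then (((q + 1) * ulp : Nat) : Int)
    else if q % 2 = 0 then ((q * ulp : Nat) : Int) else (((q + 1) * ulp : Nat) : Int)

def pvRound53 (v : Int) : Int :=
  if v < 0 then -(pvRound53Nat (-v).toNat) else pvRound53Nat v.toNat

def solution (n : Int) : Int :=
  let weeks := PySem.Int.floordiv n 7
  let first_week : Int := 28
  let last_week := first_week + (weeks - 1) * 7
  -- Python: total = (first_week + last_week) * weeks / 2 — float true division; the exact
  -- quotient is an integer (the dividend is always even), so the float is pvRound53 of it.
  let total := pvRound53 (PySem.Int.floordiv ((first_week + last_week) * weeks) 2)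
  let k := weeks + 1
  -- Python: for day in range(n % 7): total += k; k += 1 — each float += is correctly rounded.
  let res := (PySem.List.pyRange 0 (PySem.Int.mod n 7) 1).foldl
      (fun (st : Int × Int) _ => (pvRound53 (st.1 + st.2), st.2 + 1)) (total, k)
  -- Python: int(total) — total is integer-valued, so this is the identity.
  res.1

-- ===== PORT B =====
def solution_alt (n : Int) : Int :=
  let weeks := PySem.Int.floordiv n 7
  let rest := PySem.Int.mod n 7
  28 * weeks + PySem.Int.floordiv (7 * weeks * (weeks - 1)) 2
    + rest * (weeks + 1) + PySem.Int.floordiv (rest * (rest - 1)) 2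

-- ===== PRECONDITION & SPEC =====
-- On inputs of absolute value above three hundred fifty million the bank total exceeds double
-- precision, so A's float true division returns a rounded total (off by up to a few tens),
-- while B returns the exact integer total, which is the intended value of the function.
def D_solution (n : Int) : Prop := n < -350000000 ∨ 350000000 < n
instance (n : Int) : Decidable (D_solution n) := by unfold D_solution; infer_instance
def Spec_solution (n : Int) (out : Int) : Prop := ¬ D_solution n → out = solution_alt n
instance (n : Int) (out : Int) : Decidable (Spec_solution n out) := by unfold Spec_solution; infer_instance
def pvDiffWitness_solution : Int := 360000000
def pvDiffWitnessOut_solution : Int × Int := (9257144117142850, 9257144117142852)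

-- ===== CLAIM (what is proved, stated in full; the proofs are below) =====
def Claim_unchanged_solution : Prop := ∀ (n : Int), Dom_solution n → Spec_solution n (solution n)
def Claim_changed_solution : Prop := Dom_solution (pvDiffWitness_solution) ∧ D_solution (pvDiffWitness_solution) ∧ solution (pvDiffWitness_solution) = pvDiffWitnessOut_solution.1 ∧ solution_alt (pvDiffWitness_solution) = pvDiffWitnessOut_solution.2 ∧ pvDiffWitnessOut_solution.1 ≠ pvDiffWitnessOut_solution.2

-- ===== LEMMAS AND PROOFS =====

theorem pvRound53_eq_self (v : Int) (h1 : -(2 ^ 53) ≤ v) (h2 : v ≤ 2 ^ 53) :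
    pvRound53 v = v := by
  unfold pvRound53
  by_cases hv : v < 0
  · rw [if_pos hv, pvRound53Nat, if_pos (by omega : (-v).toNat ≤ 2 ^ 53)]
    omega
  · rw [if_neg hv, pvRound53Nat, if_pos (by omega : v.toNat ≤ 2 ^ 53)]
    omega

-- the rounded remainder loop performs no rounding while the running total stays small
theorem fold_round_eq : ∀ (l : List Int) (t k : Int),
    -(2 ^ 53) + 51000000 * (l.length : Int) ≤ t →
    t ≤ 2 ^ 53 - 51000000 * (l.length : Int) →
    -50000001 ≤ k → k ≤ 50000013 - (l.length : Int) →
    (l.foldl (fun (st : Int × Int) _ => (pvRound53 (st.1 + st.2), st.2 + 1)) (t, k)) =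
    (l.foldl (fun (st : Int × Int) _ => (st.1 + st.2, st.2 + 1)) (t, k)) := by
  intro l
  induction l with
  | nil => intro t k _ _ _ _; rfl
  | cons x xs ih =>
      intro t k h1 h2 h3 h4
      simp only [List.foldl_cons, List.length_cons] at *
      rw [pvRound53_eq_self (t + k) (by push_cast at *; omega) (by push_cast at *; omega)]
      exact ih (t + k) (k + 1) (by push_cast at *; omega) (by push_cast at *; omega)
        (by omega) (by push_cast at *; omega)

theorem ports_agree (n : Int) (hn1 : -350000000 ≤ n) (hn2 : n ≤ 350000000) :
    solution n = solution_alt n := by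
  unfold solution solution_alt
  have hdm := PySem.Int.floordiv_mul_add_mod n 7
  have hmod : PySem.Int.mod n 7 = n % 7 := PySem.Int.mod_eq_emod_of_pos (by norm_num)
  have hrb : 0 ≤ PySem.Int.mod n 7 ∧ PySem.Int.mod n 7 < 7 := by rw [hmod]; omega
  set w := PySem.Int.floordiv n 7 with hw
  set r := PySem.Int.mod n 7 with hr
  have hwb : -50000000 ≤ w ∧ w ≤ 50000000 := by omega
  obtain ⟨a, ha⟩ : ∃ a, w * (w - 1) = 2 * a := by
    rcases Int.even_or_odd w with ⟨b, hb⟩ | ⟨b, hb⟩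
    · exact ⟨b * (w - 1), by rw [hb]; ring⟩
    · exact ⟨w * b, by rw [hb]; ring⟩
  have hab : -1250000025000000 ≤ a ∧ a ≤ 1250000025000000 := by
    constructor <;> nlinarith [mul_nonneg (by omega : (0:Int) ≤ 50000000 - w) (by omega : (0:Int) ≤ 50000000 + w)]
  have h1 : (28 + (28 + (w - 1) * 7)) * w = 2 * (7 * a + 28 * w) := by
    linear_combination 7 * ha
  have h2 : 7 * w * (w - 1) = 2 * (7 * a) := by linear_combination 7 * ha
  have hedv : ∀ x : Int, PySem.Int.floordiv x 2 = x / 2 :=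
    fun x => PySem.Int.floordiv_eq_ediv_of_pos (by norm_num)
  have hlen : ((PySem.List.pyRange 0 r 1).length : Int) = r := by
    rw [PySem.List.length_pyRange_one]; omega
  simp only [hedv, h1, h2, Int.mul_ediv_cancel_left _ (by norm_num : (2:Int) ≠ 0)]
  rw [pvRound53_eq_self (7 * a + 28 * w) (by omega) (by omega)]
  rw [fold_round_eq _ _ _ (by rw [hlen]; omega) (by rw [hlen]; omega) (by omega) (by rw [hlen]; omega)]
  obtain ⟨hr0, hr7⟩ := hrb
  clear hr hdm hmod hlen
  interval_cases r <;> simp [PySem.List.pyRange, List.range_succ] <;> ring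

-- ===== VERDICT (by name: the statement is the Claim_ definition above) =====
theorem solution_spec : Claim_unchanged_solution := by
  intro n _ hD
  unfold D_solution at hD
  exact ports_agree n (by omega) (by omega)

theorem solution_changed : Claim_changed_solution := by
  unfold Claim_changed_solution; decide
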